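-- pv_equiv track=rewrite | github.com/lishuwnc/Kickstart-Framework-Python | archive/EE2017.py | solveEEA2017
-- ===== SOURCE A (Python) =====
-- def solveEEA2017(s, n, m):
--     t = [0] * (len(s) + 1)
--     for i in range(1, len(s) + 1):
--         t[i] = t[i - 1]
--         if s[i - 1] == 'B':
--             t[i] += 1
--     res = 0
--     while (n - 1) % len(s) != 0:
--         res += 1 if s[(n - 1) % len(s)] == 'B' else 0
--         n += 1
--     m += 1
--     res += (m - n) // len(s) * t[-1]
--     res += t[(m - 1) % len(s)]
--     return res
-- ===== SOURCE B (Python) =====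
-- def solveEEA2017(s, n, m):
--     L = len(s)
--     total = s.count('B')
--
--     def f(k):
--         q, r = divmod(k, L)
--         return q * total + s.count('B', 0, r)
--
--     return f(m) - f(n - 1)
-- ===== Notes on version B (the rewrite author's own statement) =====
-- stated objective: simpler
-- what changed: B drops A's alignment while-loop and prefix-table array: it evaluates a closed-form prefix-count f(k) = (k // L) * s.count('B') + s.count('B', 0, k % L) at the two endpoints and returns f(m) - f(n - 1).
import Mathlib
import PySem

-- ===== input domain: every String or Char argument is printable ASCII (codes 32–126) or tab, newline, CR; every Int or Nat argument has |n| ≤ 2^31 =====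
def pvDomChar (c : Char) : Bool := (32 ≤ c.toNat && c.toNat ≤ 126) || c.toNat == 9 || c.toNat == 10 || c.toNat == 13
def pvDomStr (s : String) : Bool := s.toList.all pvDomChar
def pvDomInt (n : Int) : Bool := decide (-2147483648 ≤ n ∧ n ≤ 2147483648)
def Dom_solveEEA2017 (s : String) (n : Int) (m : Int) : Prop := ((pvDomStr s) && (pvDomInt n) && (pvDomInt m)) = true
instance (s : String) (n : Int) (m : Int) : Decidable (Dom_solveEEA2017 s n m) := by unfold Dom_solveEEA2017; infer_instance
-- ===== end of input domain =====

-- B replaces A's alignment while-loop and prefix table with two closed-form prefix-count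
-- evaluations f(m) - f(n-1) over s.count (objective: simpler; return value only, no mutation).

-- ===== PORT A =====
-- A's prefix table t, ported as its defining recurrence t[0] = 0, t[i] = t[i-1] + (s[i-1] == 'B')
def pvTA (cs : List Char) : Nat → Int
  | 0 => 0
  | i+1 => pvTA cs i + (if cs.getD i ' ' = 'B' then 1 else 0)

-- termination measure fact for A's while loop (cited by decreasing_by below)
theorem pvLoopA_measure_lt (L n : Int) (hL : 0 < L) (h : (n - 1) % L ≠ 0) :
    ((1 - (n + 1)) % L).toNat < ((1 - n) % L).toNat := by
  set a := n - 1 with ha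
  have hd := Int.emod_add_ediv a L
  have hr0 : 0 ≤ a % L := Int.emod_nonneg a (by omega)
  have hrL : a % L < L := Int.emod_lt_of_pos a hL
  have h1 : (1 - n) % L = L - a % L := by
    have e : (1 - n) = (L - a % L) + L * (-(a / L) - 1) := by ring_nf; linarith
    rw [e, Int.add_mul_emod_self_left, Int.emod_eq_of_lt (by omega) (by omega)]
  have h2 : (1 - (n + 1)) % L = L - a % L - 1 := by
    have e : (1 - (n + 1)) = (L - a % L - 1) + L * (-(a / L) - 1) := by ring_nf; linarith
    rw [e, Int.add_mul_emod_self_left, Int.emod_eq_of_lt (by omega) (by omega)]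
  omega

-- A's while loop: advance n, counting 'B's, until (n - 1) % len(s) == 0
-- (the '0 < len' conjunct only makes the recursion total; Python raises ZeroDivisionError there)
def pvLoopA (cs : List Char) (n res : Int) : Int × Int :=
  if h : 0 < (cs.length : Int) ∧ PySem.Int.mod (n - 1) (cs.length : Int) ≠ 0 then
    pvLoopA cs (n + 1)
      (res + if cs.getD (PySem.Int.mod (n - 1) (cs.length : Int)).toNat ' ' = 'B' then 1 else 0)
  else (n, res)
  termination_by (PySem.Int.mod (1 - n) (cs.length : Int)).toNat
  decreasing_by
    have hL : 0 < (cs.length : Int) := h.1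
    have hm := h.2
    rw [PySem.Int.mod_eq_emod_of_pos hL] at hm ⊢
    rw [PySem.Int.mod_eq_emod_of_pos hL]
    exact pvLoopA_measure_lt _ n hL hm

def solveEEA2017 (s : String) (n : Int) (m : Int) : Int :=
  let cs := s.toList
  let L : Int := cs.length
  let p := pvLoopA cs n 0
  let m' := m + 1
  let res := p.2 + PySem.Int.floordiv (m' - p.1) L * pvTA cs cs.length
  res + pvTA cs (PySem.Int.mod (m' - 1) L).toNat

-- ===== PORT B =====
-- f(k) = (k // L) * s.count('B') + s.count('B', 0, k % L); counts ported over toList (ASCII-exact)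
def pvF (cs : List Char) (total : Int) (k : Int) : Int :=
  let L : Int := cs.length
  let q := PySem.Int.floordiv k L
  let r := PySem.Int.mod k L
  q * total + ((cs.take r.toNat).count 'B' : Int)

def solveEEA2017_alt (s : String) (n : Int) (m : Int) : Int :=
  let cs := s.toList
  let total : Int := cs.count 'B'
  pvF cs total m - pvF cs total (n - 1)

-- ===== PRECONDITION & SPEC =====
-- Pre_ excludes only s = "", where Python A raises ZeroDivisionError (len(s) is the divisor)
def Pre_solveEEA2017 (s : String) (n : Int) (m : Int) : Prop := s ≠ ""
instance (s : String) (n : Int) (m : Int) : Decidable (Pre_solveEEA2017 s n m) := by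
  unfold Pre_solveEEA2017; infer_instance

def pvWitness_solveEEA2017 : String × Int × Int := ("ABBA", -3, 7)

def Spec_solveEEA2017 (s : String) (n : Int) (m : Int) (out : Int) : Prop := out = solveEEA2017_alt s n m
instance (s : String) (n : Int) (m : Int) (out : Int) : Decidable (Spec_solveEEA2017 s n m out) := by unfold Spec_solveEEA2017; infer_instance

-- ===== CLAIM (what is proved, stated in full; the proofs are below) =====
def Claim_equal_solveEEA2017 : Prop := ∀ (s : String) (n : Int) (m : Int), Dom_solveEEA2017 s n m → Pre_solveEEA2017 s n m → Spec_solveEEA2017 s n m (solveEEA2017 s n m)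

-- ===== LEMMAS AND PROOFS =====

-- mathematical prefix-count function both ports compute with (L > 0 side only)
def pvG (cs : List Char) (k : Int) : Int :=
  k / (cs.length : Int) * (cs.count 'B' : Int)
    + (((cs.take ((k % (cs.length : Int)).toNat)).count 'B' : Int))

theorem pvTA_eq_count (cs : List Char) (i : Nat) :
    pvTA cs i = ((cs.take i).count 'B' : Int) := by
  induction i with
  | zero => simp [pvTA]
  | succ i ih =>
    rw [pvTA, ih]
    by_cases h : i < cs.length
    · have htake : cs.take (i + 1) = cs.take i ++ [cs[i]] := by
        rw [List.take_succ, List.getElem?_eq_getElem h]; rfl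
      rw [htake, List.count_append, List.count_cons, List.count_nil,
        List.getD_eq_getElem cs ' ' h]
      by_cases hB : cs[i] = 'B' <;> simp [hB]
    · have h1 : cs[i]? = none := List.getElem?_eq_none (by omega)
      have h2 : cs.getD i ' ' = ' ' := by simp [List.getD, h1]
      rw [List.take_succ, h1, h2]
      simp

theorem pvF_eq_pvG (cs : List Char) (k : Int) (hne : cs ≠ []) :
    pvF cs (cs.count 'B' : Int) k = pvG cs k := by
  have hL : 0 < (cs.length : Int) := by
    simp [List.length_pos_iff]; exact hne
  simp only [pvF, pvG, PySem.Int.floordiv_eq_ediv_of_pos hL, PySem.Int.mod_eq_emod_of_pos hL]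

theorem pvG_step (cs : List Char) (k : Int) (hne : cs ≠ []) :
    pvG cs (k + 1) = pvG cs k + (if cs.getD ((k % (cs.length : Int)).toNat) ' ' = 'B' then 1 else 0) := by
  have hL : 0 < (cs.length : Int) := by simp [List.length_pos_iff]; exact hne
  set L : Int := (cs.length : Int) with hLdef
  have hd := Int.emod_add_ediv k L
  have hr0 : 0 ≤ k % L := Int.emod_nonneg k (by omega)
  have hrL : k % L < L := Int.emod_lt_of_pos k hL
  set r : Nat := (k % L).toNat with hrdef
  have hrlt : r < cs.length := by omega
  have hgd : cs.getD r ' ' = cs[r] := List.getD_eq_getElem cs ' ' hrlt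
  by_cases hlast : k % L = L - 1
  · -- wrap-around: (k+1) % L = 0 and (k+1) / L = k / L + 1
    have hmod : (k + 1) % L = 0 := by
      rw [show k + 1 = 0 + L * (k / L + 1) from by linarith, Int.add_mul_emod_self_left,
        Int.zero_emod]
    have hdiv : (k + 1) / L = k / L + 1 := by
      rw [show k + 1 = 0 + (k / L + 1) * L from by linarith,
        Int.add_mul_ediv_right _ _ hL.ne', Int.zero_ediv, zero_add]
    have hsplit : cs = cs.take r ++ cs[r] :: cs.drop (r + 1) := by
      rw [List.getElem_cons_drop, List.take_append_drop]
    have hdrop : cs.drop (r + 1) = [] := by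
      apply List.drop_eq_nil_of_le; omega
    have hcN : cs.count 'B' = (cs.take r).count 'B' + (if cs[r] = 'B' then 1 else 0) := by
      conv_lhs => rw [hsplit, hdrop]
      rw [List.count_append, List.count_cons, List.count_nil]
      by_cases hB : cs[r] = 'B' <;> simp [hB]
    have hcI : (cs.count 'B' : Int) = ((cs.take r).count 'B' : Int)
        + (if cs[r] = 'B' then (1 : Int) else 0) := by exact_mod_cast hcN
    simp only [pvG, ← hLdef, hdiv, hmod, hgd]
    norm_num
    rw [hcI]
    ring
  · -- same block: (k+1) % L = k % L + 1 and (k+1) / L = k / L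
    have hne' : k % L ≠ L - 1 := hlast
    have hmod : (k + 1) % L = k % L + 1 := by
      rw [show k + 1 = (k % L + 1) + L * (k / L) from by linarith, Int.add_mul_emod_self_left,
        Int.emod_eq_of_lt (by omega) (by omega)]
    have hdiv : (k + 1) / L = k / L := by
      rw [show k + 1 = (k % L + 1) + (k / L) * L from by linarith,
        Int.add_mul_ediv_right _ _ hL.ne', Int.ediv_eq_zero_of_lt (by omega) (by omega), zero_add]
    have htake : cs.take (r + 1) = cs.take r ++ [cs[r]] := by
      rw [List.take_succ, List.getElem?_eq_getElem hrlt]; rfl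
    simp only [pvG, ← hLdef, hdiv, hmod, hgd]
    rw [show (k % L + 1).toNat = (k % L).toNat + 1 from by omega, htake,
      List.count_append, List.count_cons, List.count_nil]
    by_cases hB : cs[r] = 'B' <;> simp [hB] <;> ring

theorem pvLoopA_spec (cs : List Char) (hne : cs ≠ []) (n res : Int) :
    (pvLoopA cs n res).2 = res + pvG cs ((pvLoopA cs n res).1 - 1) - pvG cs (n - 1)
      ∧ ((pvLoopA cs n res).1 - 1) % (cs.length : Int) = 0 := by
  have hL : 0 < (cs.length : Int) := by simp [List.length_pos_iff]; exact hne
  induction n, res using pvLoopA.induct cs with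
  | case1 n res h ih =>
    obtain ⟨ih1, ih2⟩ := ih
    have hun : pvLoopA cs n res
        = pvLoopA cs (n + 1)
            (res + if cs.getD (PySem.Int.mod (n - 1) (cs.length : Int)).toNat ' ' = 'B' then 1 else 0) := by
      conv_lhs => rw [pvLoopA]
      rw [dif_pos h]
    simp only [dite_eq_ite] at ih1 ih2
    rw [hun]
    refine ⟨?_, ih2⟩
    rw [ih1]
    have hstep := pvG_step cs (n - 1) hne
    rw [show n - 1 + 1 = n from by ring] at hstep
    rw [PySem.Int.mod_eq_emod_of_pos hL, show n + 1 - 1 = n from by ring, hstep]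
    ring
  | case2 n res h =>
    have hun : pvLoopA cs n res = (n, res) := by
      conv_lhs => rw [pvLoopA]
      rw [dif_neg h]
    rw [hun]
    have h2 : (n - 1) % (cs.length : Int) = 0 := by
      by_contra hc
      exact h ⟨hL, by rw [PySem.Int.mod_eq_emod_of_pos hL]; exact hc⟩
    exact ⟨by ring, h2⟩

-- ===== VERDICT (by name: the statement is the Claim_ definition above) =====
theorem solveEEA2017_spec : Claim_equal_solveEEA2017 := by
  intro s n m _ hpre
  unfold Spec_solveEEA2017 solveEEA2017 solveEEA2017_alt
  set cs := s.toList with hcs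
  have hne : cs ≠ [] := fun hnil =>
    hpre (String.toList_inj.mp (by simpa [hcs] using hnil))
  have hL : 0 < (cs.length : Int) := by simp [List.length_pos_iff]; exact hne
  set L : Int := (cs.length : Int) with hLdef
  obtain ⟨hres, hmod0⟩ := pvLoopA_spec cs hne n 0
  set n' : Int := (pvLoopA cs n 0).1 with hn'
  set q : Int := (n' - 1) / L with hq
  have hqL : n' - 1 = q * L := by
    have hdm := Int.ediv_add_emod (n' - 1) L
    rw [hmod0] at hdm
    rw [hq]; linarith
  have hG1 : pvG cs (n' - 1) = q * (cs.count 'B' : Int) := by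
    simp only [pvG, ← hLdef, hqL, Int.mul_ediv_cancel _ hL.ne']
    have : q * L % L = 0 := Int.mul_emod_left q L
    simp [this]
  have hTA_L : pvTA cs cs.length = (cs.count 'B' : Int) := by
    rw [pvTA_eq_count, List.take_length]
  have hdivsub : (m + 1 - n') / L = m / L - q := by
    rw [show m + 1 - n' = m + (-q) * L from by linarith]
    rw [Int.add_mul_ediv_right _ _ hL.ne']; ring
  have hFm : pvF cs (cs.count 'B' : Int) m = pvG cs m := pvF_eq_pvG cs m hne
  have hFn : pvF cs (cs.count 'B' : Int) (n - 1) = pvG cs (n - 1) := pvF_eq_pvG cs (n - 1) hne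
  simp only [← hLdef, ← hn', hFm, hFn]
  rw [hres, hG1, hTA_L]
  rw [PySem.Int.floordiv_eq_ediv_of_pos hL, PySem.Int.mod_eq_emod_of_pos hL]
  rw [show m + 1 - 1 = m by ring, hdivsub]
  rw [pvTA_eq_count]
  simp only [pvG, ← hLdef]
  ring
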